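-- pv_equiv track=rewrite | github.com/elkebir-group/MASS | src/algorithms/parse_structures.py | group_stems
-- ===== SOURCE A (Python) =====
-- def group_stems(pairs):
--     """
--     Optional: group stacking pairs into contiguous stems (runs).
--     Returns list of stems, each as a list of pairs [(i1,j1), (i2,j2), ...] with i increasing.
--     """
--     P = set(pairs)
--     visited = set()
--     stems = []
--
--     for (i, j) in sorted(pairs):
--         if (i, j) in visited:
--             continue
--         # extend outward while neighbors exist
--         run = [(i, j)]
--         visited.add((i, j))
--
--         # extend inward (i+1, j-1)
--         ii, jj = i, j
--         while (ii + 1, jj - 1) in P and (ii + 1, jj - 1) not in visited: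
--             ii, jj = ii + 1, jj - 1
--             run.append((ii, jj))
--             visited.add((ii, jj))
--
--         # extend outward (i-1, j+1)
--         ii, jj = i, j
--         while (ii - 1, jj + 1) in P and (ii - 1, jj + 1) not in visited:
--             ii, jj = ii - 1, jj + 1
--             run.insert(0, (ii, jj))
--             visited.add((ii, jj))
--
--         stems.append(run)
--     return stems
-- ===== SOURCE B (Python) =====
-- def group_stems(pairs):
--     """
--     Optional: group stacking pairs into contiguous stems (runs).
--     Returns list of stems, each as a list of pairs [(i1,j1), (i2,j2), ...] with i increasing.
--     """
--     P = set(pairs)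
--     stems = []
--     for p in sorted(P):
--         # a stem starts exactly where no outward neighbour exists
--         if (p[0] - 1, p[1] + 1) not in P:
--             run = [p]
--             cur = p
--             while (cur[0] + 1, cur[1] - 1) in P:
--                 cur = (cur[0] + 1, cur[1] - 1)
--                 run.append(cur)
--             stems.append(run)
--     return stems
-- ===== Notes on version B (the rewrite author's own statement) =====
-- stated objective: simpler
-- what changed: A scans sorted(pairs) with a visited set and extends each run in both directions with two while loops; B drops the visited bookkeeping entirely and instead filters the sorted deduplicated pairs for run starts (pairs with no (i-1,j+1) neighbour) and builds each stem by a single forward chase.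
import Mathlib
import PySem

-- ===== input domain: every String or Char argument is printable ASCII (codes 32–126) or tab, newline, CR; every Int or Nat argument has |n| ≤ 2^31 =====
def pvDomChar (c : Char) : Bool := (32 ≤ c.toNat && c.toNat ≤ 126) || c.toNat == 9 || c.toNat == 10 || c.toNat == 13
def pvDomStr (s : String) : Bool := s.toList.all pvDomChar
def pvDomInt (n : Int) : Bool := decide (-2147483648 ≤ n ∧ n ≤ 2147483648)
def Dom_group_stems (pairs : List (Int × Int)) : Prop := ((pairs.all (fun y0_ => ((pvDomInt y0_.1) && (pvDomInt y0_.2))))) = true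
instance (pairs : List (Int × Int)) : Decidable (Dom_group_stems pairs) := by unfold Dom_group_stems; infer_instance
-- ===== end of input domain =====

-- B replaces A's visited-set scan with bidirectional extension by a direct characterization:
-- a stem starts exactly at a pair with no (i-1,j+1) neighbour and is its maximal forward (i+1,j-1) chain (objective: simpler).


-- ===== PORT A =====
-- 'while (ii+1, jj-1) in P and (ii+1, jj-1) not in visited' — fueled; each iteration adds to
-- visited a fresh member of P, so fuel = pairs.length is never exhausted before the condition fails.
def group_stems_inward (P : PySem.Set (Int × Int)) : Nat → PySem.Set (Int × Int) → List (Int × Int) → Int → Int → PySem.Set (Int × Int) × List (Int × Int)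
  | 0, visited, run, _, _ => (visited, run)
  | fuel + 1, visited, run, ii, jj =>
      if (ii + 1, jj - 1) ∈ P ∧ (ii + 1, jj - 1) ∉ visited then
        group_stems_inward P fuel (visited.add (ii + 1, jj - 1)) (run ++ [(ii + 1, jj - 1)]) (ii + 1) (jj - 1)
      else (visited, run)

-- 'while (ii-1, jj+1) in P and (ii-1, jj+1) not in visited' (run.insert(0, …)); same fuel bound.
def group_stems_outward (P : PySem.Set (Int × Int)) : Nat → PySem.Set (Int × Int) → List (Int × Int) → Int → Int → PySem.Set (Int × Int) × List (Int × Int)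
  | 0, visited, run, _, _ => (visited, run)
  | fuel + 1, visited, run, ii, jj =>
      if (ii - 1, jj + 1) ∈ P ∧ (ii - 1, jj + 1) ∉ visited then
        group_stems_outward P fuel (visited.add (ii - 1, jj + 1)) ((ii - 1, jj + 1) :: run) (ii - 1) (jj + 1)
      else (visited, run)

def group_stems (pairs : List (Int × Int)) : List (List (Int × Int)) :=
  let P := PySem.Set.ofList pairs
  ((PySem.List.sorted2 pairs Prod.fst Prod.snd).foldl
    (fun (st : PySem.Set (Int × Int) × List (List (Int × Int))) p =>
      if p ∈ st.1 then st
      else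
        let run : List (Int × Int) := [p]
        let visited := st.1.add p
        let ir := group_stems_inward P pairs.length visited run p.1 p.2
        let orr := group_stems_outward P pairs.length ir.1 ir.2 p.1 p.2
        (orr.1, st.2 ++ [orr.2]))
    (PySem.Set.empty, [])).2

-- ===== PORT B =====
-- 'while (cur[0]+1, cur[1]-1) in P: append' — fueled; the chain stays inside P with strictly
-- increasing first components, so fuel = pairs.length is never exhausted before the test fails.
def group_stems_alt_chase (P : PySem.Set (Int × Int)) : Nat → List (Int × Int) → Int × Int → List (Int × Int)
  | 0, run, _ => run
  | fuel + 1, run, cur =>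
      if (cur.1 + 1, cur.2 - 1) ∈ P then
        group_stems_alt_chase P fuel (run ++ [(cur.1 + 1, cur.2 - 1)]) (cur.1 + 1, cur.2 - 1)
      else run

def group_stems_alt (pairs : List (Int × Int)) : List (List (Int × Int)) :=
  let P := PySem.Set.ofList pairs
  (PySem.List.sorted2 P Prod.fst Prod.snd).foldl
    (fun stems p =>
      if (p.1 - 1, p.2 + 1) ∉ P then stems ++ [group_stems_alt_chase P pairs.length [p] p]
      else stems) []

-- ===== PRECONDITION & SPEC =====
def Spec_group_stems (pairs : List (Int × Int)) (out : List (List (Int × Int))) : Prop := out = group_stems_alt pairs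
instance (pairs : List (Int × Int)) (out : List (List (Int × Int))) : Decidable (Spec_group_stems pairs out) := by unfold Spec_group_stems; infer_instance

-- ===== CLAIM (what is proved, stated in full; the proofs are below) =====
def Claim_equal_group_stems : Prop := ∀ (pairs : List (Int × Int)), Dom_group_stems pairs → Spec_group_stems pairs (group_stems pairs)

-- ===== LEMMAS AND PROOFS =====

-- Python's tuple order on pairs is the lexicographic order.
def pvKey (q : Int × Int) : Lex (Int × Int) := toLex q

theorem pv_sorted2_eq_sorted (xs : List (Int × Int)) :
    PySem.List.sorted2 xs Prod.fst Prod.snd = PySem.List.sorted xs pvKey := by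
  have hbef : (fun (a b : Int × Int) => decide (a.1 < b.1) || (!decide (b.1 < a.1) && decide (a.2 < b.2)))
      = fun (a b : Int × Int) => decide (pvKey a < pvKey b) := by
    funext a b
    apply Bool.eq_iff_iff.mpr
    simp [pvKey, Prod.Lex.lt_iff]
    omega
  simp [PySem.List.sorted2, PySem.List.sorted, hbef]

theorem pv_chase_run (P : PySem.Set (Int × Int)) (fuel : Nat) : ∀ (run : List (Int × Int)) (c : Int × Int),
    group_stems_alt_chase P fuel run c = run ++ group_stems_alt_chase P fuel [] c := by
  induction fuel with
  | zero => intro run c; simp [group_stems_alt_chase]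
  | succ n ih =>
    intro run c
    simp only [group_stems_alt_chase]
    split
    · rw [ih (run ++ _), ih ([] ++ _)]; simp
    · simp

def pvAdds (P : PySem.Set (Int × Int)) (fuel : Nat) (c : Int × Int) : List (Int × Int) :=
  group_stems_alt_chase P fuel [] c

theorem pvAdds_succ (P : PySem.Set (Int × Int)) (fuel : Nat) (c : Int × Int) :
    pvAdds P (fuel + 1) c =
      if (c.1 + 1, c.2 - 1) ∈ P then (c.1 + 1, c.2 - 1) :: pvAdds P fuel (c.1 + 1, c.2 - 1) else [] := by
  simp only [pvAdds, group_stems_alt_chase]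
  split
  · rw [pv_chase_run]; simp
  · rfl

theorem pv_adds_sound (P : PySem.Set (Int × Int)) :
    ∀ (fuel : Nat) (c q : Int × Int), q ∈ pvAdds P fuel c →
      ∃ k : Nat, 1 ≤ k ∧ q = (c.1 + (k : Int), c.2 - (k : Int)) ∧
        ∀ m : Nat, 1 ≤ m → m ≤ k → (c.1 + (m : Int), c.2 - (m : Int)) ∈ P := by
  intro fuel
  induction fuel with
  | zero => intro c q h; simp [pvAdds, group_stems_alt_chase] at h
  | succ n ih =>
    intro c q h
    rw [pvAdds_succ] at h
    split at h
    · rename_i hin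
      rcases List.mem_cons.mp h with h1 | h2
      · exact ⟨1, le_refl 1, by simpa using h1, by
          intro m h1m hm1
          have : m = 1 := by omega
          subst this; simpa using hin⟩
      · obtain ⟨k, hk1, hq, hpath⟩ := ih _ _ h2
        refine ⟨k + 1, by omega, ?_, ?_⟩
        · rw [hq]; simp only [Prod.mk.injEq]; push_cast; omega
        · intro m h1m hmk
          rcases Nat.eq_or_lt_of_le h1m with h | h
          · rw [← h]; simpa using hin
          · have := hpath (m - 1) (by omega) (by omega)
            have hc : ((c.1 + 1 + ((m-1:Nat) : Int)), (c.2 - 1 - ((m-1:Nat) : Int))) = (c.1 + (m:Int), c.2 - (m:Int)) := by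
              simp only [Prod.mk.injEq]
              have : ((m - 1 : Nat) : Int) = (m : Int) - 1 := by omega
              omega
            rwa [hc] at this
    · simp at h

theorem pv_adds_complete (P : PySem.Set (Int × Int)) :
    ∀ (fuel k : Nat) (c : Int × Int), 1 ≤ k → k ≤ fuel →
      (∀ m : Nat, 1 ≤ m → m ≤ k → (c.1 + (m : Int), c.2 - (m : Int)) ∈ P) →
      (c.1 + (k : Int), c.2 - (k : Int)) ∈ pvAdds P fuel c := by
  intro fuel
  induction fuel with
  | zero => intro k c h1 h2 _; omega
  | succ n ih =>
    intro k c h1 h2 hpath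
    have hin : (c.1 + 1, c.2 - 1) ∈ P := by simpa using hpath 1 le_rfl h1
    rw [pvAdds_succ, if_pos hin]
    rcases Nat.eq_or_lt_of_le h1 with h | h
    · have he : ((c.1 + (k:Int), c.2 - (k:Int))) = (c.1 + 1, c.2 - 1) := by
        simp only [Prod.mk.injEq]; omega
      rw [he]; exact List.mem_cons_self ..
    · refine List.mem_cons_of_mem _ ?_
      have := ih (k - 1) (c.1 + 1, c.2 - 1) (by omega) (by omega) (by
        intro m hm1 hmk
        have := hpath (m + 1) (by omega) (by omega)
        have hc : ((c.1 + 1 + (m : Int)), (c.2 - 1 - (m : Int))) = (c.1 + ((m+1:Nat):Int), c.2 - ((m+1:Nat):Int)) := by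
          simp only [Prod.mk.injEq]; push_cast; omega
        rwa [hc])
      have hc : ((c.1 + 1 + ((k-1:Nat) : Int)), (c.2 - 1 - ((k-1:Nat) : Int))) = (c.1 + (k:Int), c.2 - (k:Int)) := by
        simp only [Prod.mk.injEq]
        have : ((k - 1 : Nat) : Int) = (k : Int) - 1 := by omega
        omega
      rwa [hc] at this

theorem pv_outward_noop (P V : PySem.Set (Int × Int)) (fuel : Nat) (run : List (Int × Int)) (i j : Int)
    (h : (i - 1, j + 1) ∉ P) : group_stems_outward P fuel V run i j = (V, run) := by
  cases fuel with
  | zero => rfl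
  | succ n => simp [group_stems_outward, h]

theorem pv_inward_eq_chase (P : PySem.Set (Int × Int)) :
    ∀ (fuel : Nat) (V : PySem.Set (Int × Int)) (run : List (Int × Int)) (c : Int × Int),
    (∀ k : Nat, 1 ≤ k → (∀ m : Nat, 1 ≤ m → m ≤ k → ((c.1 + (m : Int), c.2 - (m : Int)) ∈ P)) →
        ((c.1 + (k : Int), c.2 - (k : Int)) ∉ V)) →
    group_stems_inward P fuel V run c.1 c.2 = (V.update (pvAdds P fuel c), run ++ pvAdds P fuel c) := by
  intro fuel
  induction fuel with
  | zero => intro V run c _; simp [group_stems_inward, pvAdds, group_stems_alt_chase, PySem.Set.update_nil]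
  | succ n ih =>
    intro V run c hnv
    rw [pvAdds_succ]
    by_cases hin : (c.1 + 1, c.2 - 1) ∈ P
    · have hnv1 : (c.1 + 1, c.2 - 1) ∉ V := by
        have := hnv 1 le_rfl (by
          intro m h1 h2
          have he : ((c.1 + (m:Int), c.2 - (m:Int))) = (c.1 + 1, c.2 - 1) := by
            simp only [Prod.mk.injEq]; omega
          rw [he]; exact hin)
        simpa using this
      rw [if_pos hin]
      simp only [group_stems_inward, hin, hnv1, not_false_iff, and_self, if_pos]
      have ihc := ih (V.add (c.1 + 1, c.2 - 1)) (run ++ [(c.1 + 1, c.2 - 1)]) (c.1 + 1, c.2 - 1) (by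
        intro k hk hpath
        have hV := hnv (k + 1) (by omega) (by
          intro m h1 hm
          rcases Nat.eq_or_lt_of_le h1 with h | h
          · have he : ((c.1 + (m:Int), c.2 - (m:Int))) = (c.1 + 1, c.2 - 1) := by
              simp only [Prod.mk.injEq]; omega
            rw [he]; exact hin
          · have := hpath (m - 1) (by omega) (by omega)
            have hc : (((c.1+1) + ((m-1:Nat) : Int)), ((c.2-1) - ((m-1:Nat) : Int))) = (c.1 + (m:Int), c.2 - (m:Int)) := by
              simp only [Prod.mk.injEq]; omega
            rwa [hc] at this)
        rw [PySem.Set.mem_add]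
        rintro (hmem | heq)
        · have hc : (((c.1+1) + (k : Int)), ((c.2-1) - (k : Int))) = (c.1 + ((k+1:Nat):Int), c.2 - ((k+1:Nat):Int)) := by
            simp only [Prod.mk.injEq]; push_cast; omega
          rw [hc] at hmem; exact hV hmem
        · have := congrArg Prod.fst heq
          simp only at this
          omega)
      rw [ihc]
      rw [PySem.Set.update_cons]
      simp
    · rw [if_neg hin]
      cases n <;> simp [group_stems_inward, hin, PySem.Set.update_nil]

theorem pv_path_lt_length (pairs : List (Int × Int)) (p : Int × Int) (d : Int) (hd : d ≠ 0) (k : Nat)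
    (hpath : ∀ m : Nat, m ≤ k → (p.1 + d * (m : Int), p.2 - d * (m : Int)) ∈ pairs) :
    k < pairs.length := by
  have hsub : ((List.range (k+1)).map (fun m : Nat => (p.1 + d * (m : Int), p.2 - d * (m : Int)))) ⊆ pairs := by
    intro q hq
    simp only [List.mem_map, List.mem_range] at hq
    obtain ⟨m, hm, rfl⟩ := hq
    exact hpath m (by omega)
  have hnd : ((List.range (k+1)).map (fun m : Nat => (p.1 + d * (m : Int), p.2 - d * (m : Int)))).Nodup := by
    refine List.Nodup.map ?_ (List.nodup_range)
    intro a b hab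
    have := congrArg Prod.fst hab
    simp only at this
    have : d * (a : Int) = d * b := by omega
    have := mul_left_cancel₀ hd this
    exact_mod_cast this
  have := (List.subperm_of_subset hnd hsub).length_le
  simpa using this

def pvReach (pairs pre : List (Int × Int)) (q : Int × Int) : Prop :=
  ∃ j : Nat, (q.1 - (j : Int), q.2 + (j : Int)) ∈ pre ∧
    ∀ k : Nat, k ≤ j → (q.1 - (k : Int), q.2 + (k : Int)) ∈ pairs

theorem pvReach_comp {pairs pre : List (Int × Int)} {p q : Int × Int} (h : pvReach pairs pre p)
    (k : Nat) (hq : q = (p.1 + (k : Int), p.2 - (k : Int)))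
    (hpath : ∀ m : Nat, m ≤ k → (p.1 + (m : Int), p.2 - (m : Int)) ∈ pairs) :
    pvReach pairs pre q := by
  obtain ⟨j, hj, hjpath⟩ := h
  refine ⟨j + k, ?_, ?_⟩
  · have he : ((q.1 - ((j+k:Nat) : Int), q.2 + ((j+k:Nat) : Int))) = (p.1 - (j:Int), p.2 + (j:Int)) := by
      subst hq; simp only [Prod.mk.injEq]; push_cast; omega
    rw [he]; exact hj
  · intro m hm
    by_cases hmk : m ≤ k
    · have := hpath (k - m) (by omega)
      have he : ((q.1 - (m : Int), q.2 + (m : Int))) = (p.1 + ((k-m:Nat):Int), p.2 - ((k-m:Nat):Int)) := by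
        subst hq; simp only [Prod.mk.injEq]; omega
      rw [he]; exact this
    · have := hjpath (m - k) (by omega)
      have he : ((q.1 - (m : Int), q.2 + (m : Int))) = (p.1 - ((m-k:Nat):Int), p.2 + ((m-k:Nat):Int)) := by
        subst hq; simp only [Prod.mk.injEq]; omega
      rw [he]; exact this

theorem pvReach_snoc (pairs pre : List (Int × Int)) (p q : Int × Int) :
    pvReach pairs (pre ++ [p]) q ↔ pvReach pairs pre q ∨
      ∃ k : Nat, q = (p.1 + (k : Int), p.2 - (k : Int)) ∧
        ∀ m : Nat, m ≤ k → (p.1 + (m : Int), p.2 - (m : Int)) ∈ pairs := by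
  obtain ⟨p1, p2⟩ := p
  obtain ⟨q1, q2⟩ := q
  simp only at *
  constructor
  · rintro ⟨j, hj, hjpath⟩
    rcases List.mem_append.mp hj with h | h
    · exact Or.inl ⟨j, h, hjpath⟩
    · right
      rw [List.mem_singleton, Prod.mk.injEq] at h
      obtain ⟨h1, h2⟩ := h
      refine ⟨j, by simp only [Prod.mk.injEq]; omega, ?_⟩
      intro m hm
      have := hjpath (j - m) (by omega)
      have he : ((q1 - ((j-m:Nat) : Int), q2 + ((j-m:Nat) : Int))) = (p1 + (m:Int), p2 - (m:Int)) := by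
        simp only [Prod.mk.injEq]; omega
      rw [← he]; exact this
  · rintro (⟨j, hj, hjpath⟩ | ⟨k, hq, hpath⟩)
    · exact ⟨j, List.mem_append_left _ hj, hjpath⟩
    · rw [Prod.mk.injEq] at hq
      obtain ⟨h1, h2⟩ := hq
      refine ⟨k, ?_, ?_⟩
      · have he : ((q1 - (k : Int), q2 + (k : Int))) = (p1, p2) := by
          simp only [Prod.mk.injEq]; omega
        rw [he]; exact List.mem_append_right _ (List.mem_singleton_self _)
      · intro m hm
        have := hpath (k - m) (by omega)
        have he : ((q1 - (m : Int), q2 + (m : Int))) = (p1 + ((k-m:Nat):Int), p2 - ((k-m:Nat):Int)) := by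
          simp only [Prod.mk.injEq]; omega
        rw [he]; exact this

theorem pvReach_snoc_of_reach {pairs pre : List (Int × Int)} {p : Int × Int}
    (h : pvReach pairs pre p) (q : Int × Int) :
    pvReach pairs (pre ++ [p]) q ↔ pvReach pairs pre q := by
  rw [pvReach_snoc]
  constructor
  · rintro (hr | ⟨k, hq, hpath⟩)
    · exact hr
    · exact pvReach_comp h k hq hpath
  · exact Or.inl

theorem pv_root_reach (pairs pre : List (Int × Int)) (p : Int × Int)
    (hp : p ∈ pairs) (hprv : (p.1 - 1, p.2 + 1) ∈ pairs)
    (hpre : ∀ s : Int × Int, s ∈ pairs → pvKey s < pvKey p → s ∈ pre) :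
    pvReach pairs pre p := by
  obtain ⟨p1, p2⟩ := p
  simp only at *
  have hex : ∃ n : Nat, ¬ ∀ k : Nat, k ≤ n → ((p1 - (k : Int), p2 + (k : Int)) ∈ pairs) := by
    refine ⟨pairs.length, ?_⟩
    intro hf
    have := pv_path_lt_length pairs (p1, p2) (-1) (by norm_num) pairs.length (by
      intro m hm
      have := hf m hm
      have he : ((p1 + (-1) * (m : Int), p2 - (-1) * (m : Int))) = (p1 - (m:Int), p2 + (m:Int)) := by
        simp only [Prod.mk.injEq]; constructor <;> ring
      rw [he]; exact this)
    omega
  classical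
  let n₀ := Nat.find hex
  have hn₀ : ¬ ∀ k : Nat, k ≤ n₀ → ((p1 - (k : Int), p2 + (k : Int)) ∈ pairs) := Nat.find_spec hex
  have hmin : ∀ m : Nat, m < n₀ → ∀ k : Nat, k ≤ m → ((p1 - (k : Int), p2 + (k : Int)) ∈ pairs) := by
    intro m hm
    have := Nat.find_min hex hm
    simpa using this
  have hf1 : ∀ k : Nat, k ≤ 1 → ((p1 - (k : Int), p2 + (k : Int)) ∈ pairs) := by
    intro k hk
    interval_cases k
    · simpa using hp
    · simpa using hprv
  have hn2 : 2 ≤ n₀ := by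
    by_contra hcon
    interval_cases h : n₀ <;> exact hn₀ (fun k hk => hf1 k (by omega))
  set j := n₀ - 1 with hj
  have hfj : ∀ k : Nat, k ≤ j → ((p1 - (k : Int), p2 + (k : Int)) ∈ pairs) := hmin j (by omega)
  refine ⟨j, ?_, hfj⟩
  apply hpre
  · exact hfj j le_rfl
  · unfold pvKey
    rw [Prod.Lex.lt_iff]
    simp only [ofLex_toLex]
    left
    dsimp only
    omega

theorem pv_ofList_sublist {α : Type} [BEq α] [LawfulBEq α] (xs : List α) : (PySem.Set.ofList xs).Sublist xs := by
  induction xs with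
  | nil => simp [PySem.Set.ofList_nil]
  | cons x xs ih =>
    rw [PySem.Set.ofList_cons]
    refine List.Sublist.cons₂ x ?_
    simp only [PySem.Set.discard]
    exact List.Sublist.trans List.filter_sublist ih

theorem pvKey_injective : Function.Injective pvKey := fun a b h => by
  simpa using congrArg ofLex h

theorem pv_ofList_sorted_filter (pairs : List (Int × Int)) (b : Int × Int → Bool) :
    PySem.Set.ofList ((PySem.List.sorted pairs pvKey).filter b)
      = (PySem.List.sorted (PySem.Set.ofList pairs) pvKey).filter b := by
  have hndL : (PySem.Set.ofList ((PySem.List.sorted pairs pvKey).filter b)).Nodup :=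
    PySem.Set.nodup_ofList _
  have hndR : ((PySem.List.sorted (PySem.Set.ofList pairs) pvKey).filter b).Nodup := by
    refine List.Nodup.filter _ ?_
    exact ((PySem.List.sorted_perm (PySem.Set.ofList pairs) pvKey false).nodup_iff).mpr
      (PySem.Set.nodup_ofList _)
  have hperm : (PySem.Set.ofList ((PySem.List.sorted pairs pvKey).filter b)).Perm
      ((PySem.List.sorted (PySem.Set.ofList pairs) pvKey).filter b) := by
    rw [List.perm_ext_iff_of_nodup hndL hndR]
    intro q
    rw [PySem.Set.mem_ofList, List.mem_filter, List.mem_filter,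
      PySem.List.mem_sorted, PySem.List.mem_sorted, PySem.Set.mem_ofList]
  refine PySem.List.eq_of_perm_of_pairwise_le_of_injective pvKey pvKey_injective hperm ?_ ?_
  · exact ((PySem.List.sorted_pairwise pairs pvKey).filter b).sublist (pv_ofList_sublist _)
  · exact (PySem.List.sorted_pairwise (PySem.Set.ofList pairs) pvKey).filter b

-- the B-side start test as a Bool predicate
def pvStart (P : PySem.Set (Int × Int)) (s : Int × Int) : Bool := decide ((s.1 - 1, s.2 + 1) ∉ P)

-- the invariant-carrying induction over A's main loop
theorem pv_main (pairs : List (Int × Int)) :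
    ∀ (rest pre : List (Int × Int)) (V : PySem.Set (Int × Int)) (stems : List (List (Int × Int))),
    pre ++ rest = PySem.List.sorted pairs pvKey →
    (∀ q, q ∈ V ↔ pvReach pairs pre q) →
    stems = (PySem.Set.ofList (pre.filter (pvStart (PySem.Set.ofList pairs)))).map
        (fun s => group_stems_alt_chase (PySem.Set.ofList pairs) pairs.length [s] s) →
    (rest.foldl
      (fun (st : PySem.Set (Int × Int) × List (List (Int × Int))) p =>
        if p ∈ st.1 then st
        else
          let run : List (Int × Int) := [p]
          let visited := st.1.add p
          let ir := group_stems_inward (PySem.Set.ofList pairs) pairs.length visited run p.1 p.2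
          let orr := group_stems_outward (PySem.Set.ofList pairs) pairs.length ir.1 ir.2 p.1 p.2
          (orr.1, st.2 ++ [orr.2]))
      (V, stems)).2
      = (PySem.Set.ofList ((pre ++ rest).filter (pvStart (PySem.Set.ofList pairs)))).map
          (fun s => group_stems_alt_chase (PySem.Set.ofList pairs) pairs.length [s] s) := by
  intro rest
  induction rest with
  | nil => intro pre V stems _ _ hst; simpa using hst
  | cons p rest' ih =>
    intro pre V stems hsplit hV hst
    have hmemu : ∀ x : Int × Int, x ∈ pre ++ p :: rest' → x ∈ pairs := by
      intro x hx
      rw [hsplit] at hx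
      exact (PySem.List.mem_sorted pairs pvKey false x).mp hx
    have hp_pairs : p ∈ pairs := hmemu p (by simp)
    have hpw : (pre ++ p :: rest').Pairwise (fun a b => pvKey a ≤ pvKey b) := by
      rw [hsplit]; exact PySem.List.sorted_pairwise pairs pvKey
    rw [List.pairwise_append] at hpw
    obtain ⟨-, hpw2, hpw3⟩ := hpw
    rw [List.pairwise_cons] at hpw2
    have hpre_le : ∀ x ∈ pre, pvKey x ≤ pvKey p := fun x hx => hpw3 x hx p (by simp)
    have hrest_ge : ∀ x ∈ rest', pvKey p ≤ pvKey x := hpw2.1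
    have hpre_of_lt : ∀ s : Int × Int, s ∈ pairs → pvKey s < pvKey p → s ∈ pre := by
      intro s hs hlt
      have hsu : s ∈ pre ++ p :: rest' := by
        rw [hsplit]; exact (PySem.List.mem_sorted pairs pvKey false s).mpr hs
      rcases List.mem_append.mp hsu with h | h
      · exact h
      · rcases List.mem_cons.mp h with h | h
        · subst h; exact absurd hlt (lt_irrefl _)
        · exact absurd hlt (not_lt.mpr (hrest_ge s h))
    rw [List.foldl_cons]
    by_cases hpV : p ∈ V
    · rw [if_pos hpV]
      have hreachp : pvReach pairs pre p := (hV p).mp hpV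
      have hst' : stems = (PySem.Set.ofList ((pre ++ [p]).filter (pvStart (PySem.Set.ofList pairs)))).map
          (fun s => group_stems_alt_chase (PySem.Set.ofList pairs) pairs.length [s] s) := by
        by_cases hs : pvStart (PySem.Set.ofList pairs) p
        · have hppre : p ∈ pre := by
            obtain ⟨j, hjpre, hjpath⟩ := hreachp
            have hj0 : j = 0 := by
              by_contra hj
              have h1 := hjpath 1 (by omega)
              have : (p.1 - 1, p.2 + 1) ∈ PySem.Set.ofList pairs := by
                rw [PySem.Set.mem_ofList]
                simpa using h1
              simp [pvStart, this] at hs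
            subst hj0
            simpa using hjpre
          rw [List.filter_append]
          have : List.filter (pvStart (PySem.Set.ofList pairs)) [p] = [p] := by simp [hs]
          rw [this, PySem.Set.ofList_append_singleton,
            PySem.Set.add_of_mem (by
              rw [PySem.Set.mem_ofList, List.mem_filter]
              exact ⟨hppre, hs⟩)]
          exact hst
        · rw [List.filter_append]
          have : List.filter (pvStart (PySem.Set.ofList pairs)) [p] = [] := by
            simp only [List.filter_singleton]
            rw [Bool.eq_false_iff.mpr hs]
            rfl
          rw [this, List.append_nil]
          exact hst
      have := ih (pre ++ [p]) V stems (by simpa using hsplit)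
        (fun q => by rw [pvReach_snoc_of_reach hreachp]; exact hV q) hst'
      simpa using this
    · rw [if_neg hpV]
      have hnr : ¬ pvReach pairs pre p := fun h => hpV ((hV p).mpr h)
      have hstart : (p.1 - 1, p.2 + 1) ∉ pairs := by
        intro hprv
        exact hnr (pv_root_reach pairs pre p hp_pairs hprv hpre_of_lt)
      have hstartP : (p.1 - 1, p.2 + 1) ∉ PySem.Set.ofList pairs := by
        rw [PySem.Set.mem_ofList]; exact hstart
      have hppre : p ∉ pre := by
        intro h
        refine hnr ⟨0, by simpa using h, ?_⟩
        intro k hk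
        have : k = 0 := by omega
        subst this
        simpa using hp_pairs
      have hnv : ∀ k : Nat, 1 ≤ k →
          (∀ m : Nat, 1 ≤ m → m ≤ k → ((p.1 + (m : Int), p.2 - (m : Int)) ∈ PySem.Set.ofList pairs)) →
          ((p.1 + (k : Int), p.2 - (k : Int)) ∉ V.add p) := by
        intro k hk hpath
        rw [PySem.Set.mem_add]
        rintro (hmem | heq)
        · obtain ⟨j, hjpre, hjpath⟩ := (hV _).mp hmem
          dsimp only at hjpre hjpath
          have hkj : k ≤ j := by
            by_contra hcon
            have he : ((p.1 + (k:Int) - (j:Int), p.2 - (k:Int) + (j:Int))) ∈ pre := hjpre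
            have hlt : pvKey p < pvKey (p.1 + (k:Int) - (j:Int), p.2 - (k:Int) + (j:Int)) := by
              unfold pvKey
              rw [Prod.Lex.lt_iff]
              simp only [ofLex_toLex]
              left
              dsimp only
              omega
            exact absurd (hpre_le _ he) (not_le.mpr hlt)
          refine hnr ⟨j - k, ?_, ?_⟩
          · have he : ((p.1 - ((j-k:Nat) : Int), p.2 + ((j-k:Nat) : Int)))
                = (p.1 + (k:Int) - (j:Int), p.2 - (k:Int) + (j:Int)) := by
              simp only [Prod.mk.injEq]; omega
            rw [he]; exact hjpre
          · intro m hm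
            have := hjpath (k + m) (by omega)
            have he : ((p.1 - (m : Int), p.2 + (m : Int)))
                = (p.1 + (k:Int) - ((k+m:Nat):Int), p.2 - (k:Int) + ((k+m:Nat):Int)) := by
              simp only [Prod.mk.injEq]; push_cast; omega
            rw [he]; exact this
        · have := congrArg Prod.fst heq
          dsimp only at this
          omega
      have hir := pv_inward_eq_chase (PySem.Set.ofList pairs) pairs.length (V.add p) [p] p hnv
      have horr := pv_outward_noop (PySem.Set.ofList pairs)
        ((V.add p).update (pvAdds (PySem.Set.ofList pairs) pairs.length p)) pairs.length
        ([p] ++ pvAdds (PySem.Set.ofList pairs) pairs.length p) p.1 p.2 hstartP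
      simp only [hir, horr]
      have hchase : group_stems_alt_chase (PySem.Set.ofList pairs) pairs.length [p] p
          = [p] ++ pvAdds (PySem.Set.ofList pairs) pairs.length p := pv_chase_run _ _ _ _
      have hst' : stems ++ [[p] ++ pvAdds (PySem.Set.ofList pairs) pairs.length p]
          = (PySem.Set.ofList ((pre ++ [p]).filter (pvStart (PySem.Set.ofList pairs)))).map
            (fun s => group_stems_alt_chase (PySem.Set.ofList pairs) pairs.length [s] s) := by
        have hs : pvStart (PySem.Set.ofList pairs) p = true := by
          simp [pvStart, hstartP]
        rw [List.filter_append]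
        have : List.filter (pvStart (PySem.Set.ofList pairs)) [p] = [p] := by simp [hs]
        rw [this, PySem.Set.ofList_append_singleton,
          PySem.Set.add_of_not_mem (by
            rw [PySem.Set.mem_ofList, List.mem_filter]
            rintro ⟨h, -⟩
            exact hppre h), List.map_append, hst]
        simp [hchase]
      have hV' : ∀ q, q ∈ ((V.add p).update (pvAdds (PySem.Set.ofList pairs) pairs.length p))
          ↔ pvReach pairs (pre ++ [p]) q := by
        intro q
        rw [PySem.Set.mem_update, PySem.Set.mem_add, pvReach_snoc]
        constructor
        · rintro ((hq | hq) | hq)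
          · exact Or.inl ((hV q).mp hq)
          · subst hq
            refine Or.inr ⟨0, by simp, ?_⟩
            intro m hm
            have : m = 0 := by omega
            subst this
            simpa using hp_pairs
          · obtain ⟨k, hk1, hqe, hpath⟩ := pv_adds_sound (PySem.Set.ofList pairs) pairs.length p q hq
            refine Or.inr ⟨k, hqe, ?_⟩
            intro m hm
            rcases Nat.eq_zero_or_pos m with h | h
            · subst h; simpa using hp_pairs
            · have := hpath m (by omega) hm
              rw [PySem.Set.mem_ofList] at this
              exact this
        · rintro (hq | ⟨k, hqe, hpath⟩)
          · exact Or.inl (Or.inl ((hV q).mpr hq))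
          · rcases Nat.eq_zero_or_pos k with h | h
            · subst h
              refine Or.inl (Or.inr ?_)
              rw [hqe]
              refine Prod.ext ?_ ?_ <;> simp
            · refine Or.inr ?_
              have hklt : k < pairs.length := pv_path_lt_length pairs p 1 (by norm_num) k (by
                intro m hm
                have := hpath m hm
                simpa using this)
              rw [hqe]
              refine pv_adds_complete (PySem.Set.ofList pairs) pairs.length k p h (by omega) ?_
              intro m _ hm
              rw [PySem.Set.mem_ofList]
              exact hpath m hm
      have := ih (pre ++ [p])
        ((V.add p).update (pvAdds (PySem.Set.ofList pairs) pairs.length p))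
        (stems ++ [[p] ++ pvAdds (PySem.Set.ofList pairs) pairs.length p])
        (by simpa using hsplit) hV' hst'
      simpa using this

-- ===== VERDICT (by name: the statement is the Claim_ definition above) =====
theorem group_stems_spec : Claim_equal_group_stems := by
  intro pairs _
  unfold Spec_group_stems
  have hA : group_stems pairs
      = (PySem.Set.ofList ((PySem.List.sorted pairs pvKey).filter (pvStart (PySem.Set.ofList pairs)))).map
          (fun s => group_stems_alt_chase (PySem.Set.ofList pairs) pairs.length [s] s) := by
    have h := pv_main pairs (PySem.List.sorted pairs pvKey) [] PySem.Set.empty []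
      (by simp)
      (by intro q; simp [PySem.Set.empty, pvReach])
      (by simp [PySem.Set.ofList_nil])
    unfold group_stems
    rw [pv_sorted2_eq_sorted]
    simpa using h
  have hB : group_stems_alt pairs
      = ((PySem.List.sorted (PySem.Set.ofList pairs) pvKey).filter (pvStart (PySem.Set.ofList pairs))).map
          (fun s => group_stems_alt_chase (PySem.Set.ofList pairs) pairs.length [s] s) := by
    have hfun : (fun (stems : List (List (Int × Int))) (p : Int × Int) =>
          if (p.1 - 1, p.2 + 1) ∉ PySem.Set.ofList pairs then
            stems ++ [group_stems_alt_chase (PySem.Set.ofList pairs) pairs.length [p] p]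
          else stems)
        = (fun acc x => if pvStart (PySem.Set.ofList pairs) x = true then
            acc ++ [group_stems_alt_chase (PySem.Set.ofList pairs) pairs.length [x] x]
          else acc) := by
      funext acc x
      by_cases h : (x.1 - 1, x.2 + 1) ∈ PySem.Set.ofList pairs <;> simp [pvStart, h]
    unfold group_stems_alt
    show List.foldl
        (fun stems p => if (p.1 - 1, p.2 + 1) ∉ PySem.Set.ofList pairs then
            stems ++ [group_stems_alt_chase (PySem.Set.ofList pairs) pairs.length [p] p]
          else stems)
        [] (PySem.List.sorted2 (PySem.Set.ofList pairs) Prod.fst Prod.snd) = _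
    rw [pv_sorted2_eq_sorted, hfun, PySem.List.foldl_append_if]
    simp
  rw [hA, hB, pv_ofList_sorted_filter]
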